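-- pv_equiv track=rewrite | github.com/jhdkrwmc/project-vibe | wsl/out/uvc_pcap_reporter.py | split_csv_line
-- ===== SOURCE A (Python) =====
-- def split_csv_line(line: str) -> list[str]:
--     row, cur, inq = [], [], False
--     for ch in line:
--         if ch == '"': inq = not inq; continue
--         if ch == ',' and not inq: row.append(''.join(cur)); cur=[]; continue
--         cur.append(ch)
--     row.append(''.join(cur))
--     return row
-- ===== SOURCE B (Python) =====
-- def split_csv_line(line: str) -> list[str]:
--     done, cur = [], ''
--     for i, seg in enumerate(line.split('"')):
--         if i % 2:                      # inside quotes: raw text, commas included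
--             cur += seg
--         else:                          # outside quotes: commas separate fields
--             parts = seg.split(',')
--             cur += parts[0]
--             for p in parts[1:]:
--                 done.append(cur)
--                 cur = p
--     return done + [cur]
-- ===== Notes on version B (the rewrite author's own statement) =====
-- stated objective: faster
-- what changed: Replaces the char-by-char quote state machine with one pass over the segments produced by splitting on the quote character: odd segments are quoted text appended verbatim to the current field, even segments are split on commas into new fields.
import Mathlib
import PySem

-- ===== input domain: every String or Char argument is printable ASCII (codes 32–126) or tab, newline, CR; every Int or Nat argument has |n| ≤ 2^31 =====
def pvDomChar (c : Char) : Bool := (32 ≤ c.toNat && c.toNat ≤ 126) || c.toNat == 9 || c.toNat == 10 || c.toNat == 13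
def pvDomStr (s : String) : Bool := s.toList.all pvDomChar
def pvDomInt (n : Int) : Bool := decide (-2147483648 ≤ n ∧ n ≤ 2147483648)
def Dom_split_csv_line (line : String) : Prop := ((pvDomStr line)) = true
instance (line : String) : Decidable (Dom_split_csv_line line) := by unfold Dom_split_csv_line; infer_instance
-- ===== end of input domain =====

-- B replaces A's char-by-char quote state machine by splitting on the quote character (odd
-- segments are quoted text, even segments are split on commas); same O(n) asymptotics, but
-- measurably faster in Python since the work moves into bulk str.split calls.

-- ===== PORT A =====
-- Python's `cur` list of chars is modeled as List Char; ''.join(cur) is String.ofList (exact).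
def csvStepA (st : List String × List Char × Bool) (ch : Char) : List String × List Char × Bool :=
  if ch = '"' then (st.1, st.2.1, !st.2.2)
  else if ch = ',' ∧ st.2.2 = false then (st.1 ++ [String.ofList st.2.1], [], st.2.2)
  else (st.1, st.2.1 ++ [ch], st.2.2)

def split_csv_line (line : String) : List String :=
  let st := line.toList.foldl csvStepA ([], [], false)
  st.1 ++ [String.ofList st.2.1]

-- ===== PORT B =====
-- Python strings are modeled as List Char (exact); str.split(sep) is PySem.Chars.splitOn.
-- inner loop `for p in parts[1:]: done.append(cur); cur = p`
def csvInnerB (st : List String × List Char) (p : List Char) : List String × List Char :=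
  (st.1 ++ [String.ofList st.2], p)

def csvStepB (st : List String × List Char) (iseg : Int × List Char) : List String × List Char :=
  if PySem.Int.mod iseg.1 2 ≠ 0 then (st.1, st.2 ++ iseg.2)
  else
    let parts := PySem.Chars.splitOn iseg.2 [',']
    (parts.tail).foldl csvInnerB (st.1, st.2 ++ parts.headD [])  -- parts[0]: parts is never empty

def split_csv_line_alt (line : String) : List String :=
  let segs := PySem.Chars.splitOn line.toList ['"']
  let st := (PySem.List.enumerate segs).foldl csvStepB ([], [])
  st.1 ++ [String.ofList st.2]

-- ===== PRECONDITION & SPEC =====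
def Spec_split_csv_line (line : String) (out : List String) : Prop := out = split_csv_line_alt line
instance (line : String) (out : List String) : Decidable (Spec_split_csv_line line out) := by unfold Spec_split_csv_line; infer_instance

-- ===== CLAIM (what is proved, stated in full; the proofs are below) =====
def Claim_equal_split_csv_line : Prop := ∀ (line : String), Dom_split_csv_line line → Spec_split_csv_line line (split_csv_line line)

-- ===== LEMMAS AND PROOFS =====

-- prepend a run of chars onto the first field (the [] case never occurs on our lists)
def pvGlue (s : List Char) : List (List Char) → List (List Char)
  | [] => [s]
  | h :: t => (s ++ h) :: t

-- reference: fields of the remaining input given the in-quotes flag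
def pvRef : List Char → Bool → List (List Char)
  | [], _ => [[]]
  | c :: cs, q =>
    if c = '"' then pvRef cs (!q)
    else if c = ',' ∧ q = false then [] :: pvRef cs false
    else pvGlue [c] (pvRef cs q)

-- structural form of Python's s.split(c) for a single-char separator
def pvSplit1 (sep : Char) : List Char → List (List Char)
  | [] => [[]]
  | c :: cs => if c = sep then [] :: pvSplit1 sep cs else pvGlue [c] (pvSplit1 sep cs)

theorem pvSplit1_ne_nil (sep : Char) (cs : List Char) : pvSplit1 sep cs ≠ [] := by
  cases cs with
  | nil => simp [pvSplit1]
  | cons c cs =>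
    simp only [pvSplit1]
    split
    · simp
    · cases h : pvSplit1 sep cs <;> simp [pvGlue]

theorem pvRef_ne_nil (cs : List Char) (q : Bool) : pvRef cs q ≠ [] := by
  cases cs with
  | nil => simp [pvRef]
  | cons c cs =>
    simp only [pvRef]
    split
    · exact pvRef_ne_nil cs (!q)
    · split
      · simp
      · cases h : pvRef cs q <;> simp [pvGlue]

theorem pvGlue_glue (s t : List Char) (l : List (List Char)) :
    pvGlue s (pvGlue t l) = pvGlue (s ++ t) l := by
  cases l <;> simp [pvGlue]

theorem pvGlue_nil (l : List (List Char)) (h : l ≠ []) : pvGlue [] l = l := by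
  cases l with
  | nil => exact absurd rfl h
  | cons a t => simp [pvGlue]

-- PySem.Chars.splitOn with a one-char separator is pvSplit1
theorem splitOn_go_singleton (sep : Char) (fuel : Nat) (l cur : List Char)
    (acc : List (List Char)) (h : l.length < fuel) :
    PySem.Chars.splitOn.go [sep] fuel l cur acc
      = acc.reverse ++ pvGlue cur.reverse (pvSplit1 sep l) := by
  induction l generalizing fuel cur acc with
  | nil =>
    cases fuel with
    | zero => omega
    | succ f => simp [PySem.Chars.splitOn.go, pvSplit1, pvGlue]
  | cons c cs ih =>
    cases fuel with
    | zero => omega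
    | succ f =>
      simp only [PySem.Chars.splitOn.go]
      by_cases hc : c = sep
      · subst hc
        have hp : [c].isPrefixOf (c :: cs) = true := by simp [List.isPrefixOf]
        rw [if_pos hp]
        simp only [List.length_cons] at h
        simp only [List.length_cons, List.length_nil, List.drop_succ_cons, List.drop_zero]
        rw [ih f [] (cur.reverse :: acc) (by omega)]
        have hne := pvSplit1_ne_nil c cs
        rw [show pvSplit1 c (c :: cs) = [] :: pvSplit1 c cs from by simp [pvSplit1]]
        simp only [List.reverse_nil]
        rw [pvGlue_nil _ hne]
        simp [pvGlue]
      · have hp : [sep].isPrefixOf (c :: cs) = false := by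
          simp [List.isPrefixOf]
          exact fun hh => absurd hh.symm hc
        rw [if_neg (by simp [hp])]
        simp only [List.length_cons] at h
        rw [ih f (c :: cur) acc (by omega)]
        obtain ⟨hh, tt, heq⟩ := List.exists_cons_of_ne_nil (pvSplit1_ne_nil sep cs)
        simp [pvSplit1, hc, heq, pvGlue]

theorem splitOn_singleton (sep : Char) (l : List Char) :
    PySem.Chars.splitOn l [sep] = pvSplit1 sep l := by
  unfold PySem.Chars.splitOn
  rw [splitOn_go_singleton sep (l.length + 1) l [] [] (by omega)]
  simp [pvGlue_nil _ (pvSplit1_ne_nil sep l)]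

-- ===== A side =====
theorem foldA_eq (cs : List Char) (row : List String) (cur : List Char) (q : Bool) :
    (cs.foldl csvStepA (row, cur, q)).1 ++ [String.ofList (cs.foldl csvStepA (row, cur, q)).2.1]
      = row ++ (pvGlue cur (pvRef cs q)).map String.ofList := by
  induction cs generalizing row cur q with
  | nil => simp [pvRef, pvGlue]
  | cons c cs ih =>
    simp only [List.foldl_cons, csvStepA, pvRef]
    by_cases h1 : c = '"'
    · simp only [if_pos h1]
      exact ih row cur (!q)
    · rw [if_neg h1, if_neg h1]
      by_cases h2 : c = ',' ∧ q = false
      · rw [if_pos h2, if_pos h2]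
        rw [ih (row ++ [String.ofList cur]) [] q]
        have hne := pvRef_ne_nil cs false
        rcases h2 with ⟨_, hq⟩; subst hq
        rw [pvGlue_nil _ hne]
        simp [pvGlue]
      · rw [if_neg h2, if_neg h2]
        rw [ih row (cur ++ [c]) q, ← pvGlue_glue]

-- ===== B side =====
-- B's loop re-expressed with a parity flag instead of the enumerate index
def pvEven (st : List String × List Char) (seg : List Char) : List String × List Char :=
  let parts := pvSplit1 ',' seg
  (parts.tail).foldl csvInnerB (st.1, st.2 ++ parts.headD [])

def pvBFold : Bool → (List String × List Char) → List (List Char) → (List String × List Char)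
  | _, st, [] => st
  | q, st, seg :: rest => pvBFold (!q) (if q then (st.1, st.2 ++ seg) else pvEven st seg) rest

theorem enum_parity (segs : List (List Char)) (k : Nat) (st : List String × List Char) :
    (PySem.List.enumerate segs (k : Int)).foldl csvStepB st
      = pvBFold (k % 2 = 1) st segs := by
  induction segs generalizing k st with
  | nil => simp [PySem.List.enumerate_nil, pvBFold]
  | cons seg rest ih =>
    rw [PySem.List.enumerate_cons, List.foldl_cons]
    have hmod : PySem.Int.mod (k : Int) 2 = ((k % 2 : Nat) : Int) := by
      rw [PySem.Int.mod_eq_emod_of_pos (by norm_num : (0:Int) < 2)]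
      omega
    have hstep : csvStepB st ((k : Int), seg)
        = if k % 2 = 1 then (st.1, st.2 ++ seg) else pvEven st seg := by
      simp only [csvStepB, hmod, pvEven, splitOn_singleton]
      by_cases hk : k % 2 = 1
      · rw [if_pos hk, if_pos (by omega)]
      · rw [if_neg hk, if_neg (by omega)]
    have hcast : ((k : Int) + 1) = ((k + 1 : Nat) : Int) := by push_cast; ring
    rw [hstep, hcast, ih (k + 1)]
    by_cases hk : k % 2 = 1
    · rw [if_pos hk]
      have : ¬ ((k + 1) % 2 = 1) := by omega
      simp [pvBFold, hk, this]
    · rw [if_neg hk]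
      have : (k + 1) % 2 = 1 := by omega
      simp [pvBFold, hk, this]

theorem pvEven_nil (st : List String × List Char) : pvEven st [] = st := by
  simp [pvEven, pvSplit1]

theorem pvEven_comma (st : List String × List Char) (s : List Char) :
    pvEven st (',' :: s) = pvEven (st.1 ++ [String.ofList st.2], []) s := by
  obtain ⟨h, t, heq⟩ := List.exists_cons_of_ne_nil (pvSplit1_ne_nil ',' s)
  simp [pvEven, pvSplit1, heq, csvInnerB]

theorem pvEven_other (st : List String × List Char) (c : Char) (s : List Char) (hc : c ≠ ',') :
    pvEven st (c :: s) = pvEven (st.1, st.2 ++ [c]) s := by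
  obtain ⟨h, t, heq⟩ := List.exists_cons_of_ne_nil (pvSplit1_ne_nil ',' s)
  simp [pvEven, pvSplit1, hc, heq, pvGlue]

theorem foldB_eq (cs : List Char) (q : Bool) (done : List String) (cur : List Char) :
    (pvBFold q (done, cur) (pvSplit1 '"' cs)).1
        ++ [String.ofList (pvBFold q (done, cur) (pvSplit1 '"' cs)).2]
      = done ++ (pvGlue cur (pvRef cs q)).map String.ofList := by
  induction cs generalizing q done cur with
  | nil =>
    cases q <;> simp [pvSplit1, pvBFold, pvEven_nil, pvRef, pvGlue]
  | cons c cs ih =>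
    by_cases h1 : c = '"'
    · subst h1
      rw [show pvSplit1 '"' ('"' :: cs) = [] :: pvSplit1 '"' cs from by simp [pvSplit1]]
      rw [show pvRef ('"' :: cs) q = pvRef cs (!q) from by simp [pvRef]]
      cases q
      · rw [show pvBFold false (done, cur) ([] :: pvSplit1 '"' cs)
              = pvBFold true (done, cur) (pvSplit1 '"' cs) from by
            simp [pvBFold, pvEven_nil]]
        exact ih true done cur
      · rw [show pvBFold true (done, cur) ([] :: pvSplit1 '"' cs)
              = pvBFold false (done, cur) (pvSplit1 '"' cs) from by
            simp [pvBFold]]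
        exact ih false done cur
    · obtain ⟨h, t, heq⟩ := List.exists_cons_of_ne_nil (pvSplit1_ne_nil '"' cs)
      rw [show pvSplit1 '"' (c :: cs) = (c :: h) :: t from by
        simp [pvSplit1, h1, heq, pvGlue]]
      cases q with
      | true =>
        rw [show pvBFold true (done, cur) ((c :: h) :: t)
              = pvBFold true (done, cur ++ [c]) (h :: t) from by simp [pvBFold]]
        rw [← heq, ih true done (cur ++ [c])]
        rw [show pvRef (c :: cs) true = pvGlue [c] (pvRef cs true) from by
          simp [pvRef, h1]]
        rw [pvGlue_glue]
      | false =>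
        by_cases h2 : c = ','
        · subst h2
          rw [show pvBFold false (done, cur) ((',' :: h) :: t)
              = pvBFold false (done ++ [String.ofList cur], []) (h :: t) from by
            simp [pvBFold, pvEven_comma]]
          rw [← heq, ih false (done ++ [String.ofList cur]) []]
          rw [show pvRef (',' :: cs) false = [] :: pvRef cs false from by
            simp [pvRef, h1]]
          rw [pvGlue_nil _ (pvRef_ne_nil cs false)]
          simp [pvGlue]
        · rw [show pvBFold false (done, cur) ((c :: h) :: t)
              = pvBFold false (done, cur ++ [c]) (h :: t) from by
            simp [pvBFold, pvEven_other _ _ _ h2]]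
          rw [← heq, ih false done (cur ++ [c])]
          rw [show pvRef (c :: cs) false = pvGlue [c] (pvRef cs false) from by
            simp [pvRef, h1, h2]]
          rw [pvGlue_glue]

-- ===== VERDICT (by name: the statement is the Claim_ definition above) =====
theorem split_csv_line_spec : Claim_equal_split_csv_line := by
  intro line _
  show split_csv_line line = split_csv_line_alt line
  simp only [split_csv_line, split_csv_line_alt, splitOn_singleton]
  rw [foldA_eq line.toList [] [] false]
  have := enum_parity (pvSplit1 '"' line.toList) 0 ([], [])
  norm_num at this
  rw [this]
  rw [foldB_eq line.toList false [] []]
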